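-- pv_equiv track=rewrite | github.com/ywu57232/Centroid_discriminant_Analysis | python/cda.py | updateCM_forward
-- ===== SOURCE A (Python) =====
-- def updateCM_forward(r, mapped_labels, i, Int):
--     cm = dict(r)
--
--     start_idx = (i - 1) * Int
--     end_idx = i * Int
--
--     for j in range(start_idx, min(end_idx, len(mapped_labels))):
--         if mapped_labels[j] == 0:
--             cm["tn"] += 1
--             cm["fp"] -= 1
--         else:
--             cm["tp"] -= 1
--             cm["fn"] += 1
--
--     return cm
-- ===== SOURCE B (Python) =====
-- def updateCM_forward(r, mapped_labels, i, Int):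
--     cm = dict(r)
--     # clamp the stop at 0: a negative computed stop means an empty range, not "from the end"
--     block = mapped_labels[(i - 1) * Int: max(min(i * Int, len(mapped_labels)), 0)]
--     zeros = sum(1 for x in block if x == 0)
--     ones = len(block) - zeros
--     if zeros:
--         cm["tn"] += zeros
--         cm["fp"] -= zeros
--     if ones:
--         cm["tp"] -= ones
--         cm["fn"] += ones
--     return cm
-- ===== Notes on version B (the rewrite author's own statement) =====
-- stated objective: simpler
-- what changed: B replaces A's per-element loop (branching and updating the dict four ways element by element) by slicing the block once, counting its zeros in one aggregate pass, and applying the four confusion-matrix deltas in a single guarded shot.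
import Mathlib
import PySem

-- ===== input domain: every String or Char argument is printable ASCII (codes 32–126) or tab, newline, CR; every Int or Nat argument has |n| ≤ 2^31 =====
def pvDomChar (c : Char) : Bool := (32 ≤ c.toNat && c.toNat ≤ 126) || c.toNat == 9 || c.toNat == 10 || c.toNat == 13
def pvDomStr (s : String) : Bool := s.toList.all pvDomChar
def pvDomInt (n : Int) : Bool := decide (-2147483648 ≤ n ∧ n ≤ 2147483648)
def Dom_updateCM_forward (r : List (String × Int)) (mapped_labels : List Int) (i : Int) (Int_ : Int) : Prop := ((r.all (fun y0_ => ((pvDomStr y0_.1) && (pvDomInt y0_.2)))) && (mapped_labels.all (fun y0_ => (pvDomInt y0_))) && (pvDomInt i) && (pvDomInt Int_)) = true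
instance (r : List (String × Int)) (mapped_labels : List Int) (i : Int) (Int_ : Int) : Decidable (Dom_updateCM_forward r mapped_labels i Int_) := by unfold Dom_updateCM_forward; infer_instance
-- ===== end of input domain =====

-- B slices the label block once, counts its zeros in one aggregate pass and applies the four
-- confusion-matrix deltas in a single guarded shot, instead of A's per-element loop of dict updates
-- (objective: simpler; equivalence of RETURN values is claimed for block start (i-1)*Int_ ≥ 0).

-- ===== PORT A =====
def updateCM_forward (r : List (String × Int)) (mapped_labels : List Int) (i : Int) (Int_ : Int) : List (String × Int) :=
  let cm := PySem.Dict.ofList r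
  let start_idx := (i - 1) * Int_
  let end_idx := i * Int_
  let cm := (PySem.List.pyRange start_idx (min end_idx (mapped_labels.length : Int)) 1).foldl
    (fun cm j =>
      if PySem.List.pyGetD mapped_labels j 0 = 0 then
        (cm.modify "tn" 0 (· + 1)).modify "fp" 0 (· - 1)
      else
        (cm.modify "tp" 0 (· - 1)).modify "fn" 0 (· + 1)) cm
  cm.items

-- ===== PORT B =====
def updateCM_forward_alt (r : List (String × Int)) (mapped_labels : List Int) (i : Int) (Int_ : Int) : List (String × Int) :=
  let cm := PySem.Dict.ofList r
  -- block = mapped_labels[(i-1)*Int : max(min(i*Int, len(mapped_labels)), 0)]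
  let block := PySem.List.slice mapped_labels (some ((i - 1) * Int_)) (some (max (min (i * Int_) (mapped_labels.length : Int)) 0))
  let zeros : Int := (block.map (fun x => if x = 0 then (1 : Int) else 0)).sum
  let ones : Int := (block.length : Int) - zeros
  let cm := if zeros ≠ 0 then (cm.modify "tn" 0 (· + zeros)).modify "fp" 0 (· - zeros) else cm
  let cm := if ones ≠ 0 then (cm.modify "tp" 0 (· - ones)).modify "fn" 0 (· + ones) else cm
  cm.items

-- ===== PRECONDITION & SPEC =====
-- the block A's loop walks (empty when the clamped stop is at or before the start)
def pvBlock (mapped_labels : List Int) (i : Int) (Int_ : Int) : List Int :=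
  PySem.List.slice mapped_labels (some ((i - 1) * Int_)) (some (max (min (i * Int_) (mapped_labels.length : Int)) 0))

-- Pre_ excludes (a) inputs whose block start (i-1)*Int_ is negative while the loop range is
-- nonempty — outside the natural block numbering i ≥ 1 with nonnegative block size, where A reads
-- labels through Python's negative-index wraparound, an accident of A's range-based indexing (or an
-- IndexError) — and (b) inputs where the loop touches a counter key missing from r, on which A
-- raises KeyError.
def Pre_updateCM_forward (r : List (String × Int)) (mapped_labels : List Int) (i : Int) (Int_ : Int) : Prop :=
  (0 ≤ (i - 1) * Int_ ∨ min (i * Int_) (mapped_labels.length : Int) ≤ (i - 1) * Int_) ∧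
  ((0 : Int) ∈ pvBlock mapped_labels i Int_ → "tn" ∈ r.map Prod.fst ∧ "fp" ∈ r.map Prod.fst) ∧
  ((∃ x ∈ pvBlock mapped_labels i Int_, x ≠ 0) → "tp" ∈ r.map Prod.fst ∧ "fn" ∈ r.map Prod.fst)
instance (r : List (String × Int)) (mapped_labels : List Int) (i : Int) (Int_ : Int) : Decidable (Pre_updateCM_forward r mapped_labels i Int_) := by unfold Pre_updateCM_forward; infer_instance

def pvWitness_updateCM_forward : (List (String × Int)) × List Int × Int × Int :=
  ([("tn", 5), ("fp", 3), ("tp", 2), ("fn", 0)], [0, 1, 0], 1, 2)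

def Spec_updateCM_forward (r : List (String × Int)) (mapped_labels : List Int) (i : Int) (Int_ : Int) (out : List (String × Int)) : Prop := out = updateCM_forward_alt r mapped_labels i Int_
instance (r : List (String × Int)) (mapped_labels : List Int) (i : Int) (Int_ : Int) (out : List (String × Int)) : Decidable (Spec_updateCM_forward r mapped_labels i Int_ out) := by unfold Spec_updateCM_forward; infer_instance

-- ===== CLAIM (what is proved, stated in full; the proofs are below) =====
def Claim_equal_updateCM_forward : Prop := ∀ (r : List (String × Int)) (mapped_labels : List Int) (i : Int) (Int_ : Int), Dom_updateCM_forward r mapped_labels i Int_ → Pre_updateCM_forward r mapped_labels i Int_ → Spec_updateCM_forward r mapped_labels i Int_ (updateCM_forward r mapped_labels i Int_)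

-- ===== LEMMAS AND PROOFS =====

-- the zero count of a block, as B computes it
def pvZeros (block : List Int) : Int := (block.map (fun x => if x = 0 then (1 : Int) else 0)).sum

-- per-key delta applied to the confusion matrix by a block with z zeros and o non-zeros
def pvDelta (z o : Int) (k : String) : Int :=
  if k = "tn" then z else if k = "fp" then -z else if k = "tp" then -o else if k = "fn" then o else 0

def pvUpd (z o : Int) (p : String × Int) : String × Int := (p.1, p.2 + pvDelta z o p.1)

-- A's loop body as a function of the label value
def pvStepA (cm : PySem.Dict String Int) (x : Int) : PySem.Dict String Int :=
  if x = 0 then (cm.modify "tn" 0 (· + 1)).modify "fp" 0 (· - 1)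
  else (cm.modify "tp" 0 (· - 1)).modify "fn" 0 (· + 1)

theorem pvUpd_zero (p : String × Int) : pvUpd 0 0 p = p := by
  simp [pvUpd, pvDelta]

theorem pvUpd_comp (z1 o1 z2 o2 : Int) (p : String × Int) :
    pvUpd z2 o2 (pvUpd z1 o1 p) = pvUpd (z1 + z2) (o1 + o2) p := by
  simp only [pvUpd, pvDelta]
  split_ifs <;> simp <;> ring

theorem pv_contains_ofList (ps : List (String × Int)) (k : String) :
    (PySem.Dict.ofList ps).contains k = true ↔ k ∈ ps.map Prod.fst := by
  have h : ∀ (qs : List (String × Int)) (d : PySem.Dict String Int),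
      (List.foldl (fun acc p => acc.insert p.1 p.2) d qs).contains k = true
        ↔ k ∈ qs.map Prod.fst ∨ d.contains k = true := by
    intro qs
    induction qs with
    | nil => intro d; simp
    | cons p t ih =>
      intro d
      simp only [List.foldl_cons, List.map_cons, List.mem_cons, ih,
        PySem.Dict.contains_insert, Bool.or_eq_true, beq_iff_eq]
      tauto
  simpa [PySem.Dict.ofList, PySem.Dict.update, PySem.Dict.contains_empty] using
    h ps PySem.Dict.empty

theorem pv_items_modify (d : PySem.Dict String Int) (k : String) (f : Int → Int)
    (hc : d.contains k = true) (hn : d.keys.Nodup) :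
    (d.modify k 0 f).items = d.items.map (fun p => if p.1 = k then (p.1, f p.2) else p) := by
  show (d.insert k (f (d.getD k 0))).items = _
  rw [PySem.Dict.items_insert_of_contains d _ hc]
  apply List.map_congr_left
  intro p hp
  by_cases hpk : p.1 = k
  · have hmem : (k, p.2) ∈ d.items := by rw [← hpk]; simpa using hp
    have := PySem.Dict.getD_of_mem_items d hmem hn 0
    simp [hpk, this]
  · simp [hpk]

theorem pv_keys_modify_of_contains (d : PySem.Dict String Int) (k : String) (f : Int → Int)
    (hc : d.contains k = true) (hn : d.keys.Nodup) :
    (d.modify k 0 f).keys = d.keys := by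
  show (PySem.Dict.modify d k 0 f).keys = d.keys
  unfold PySem.Dict.keys
  rw [show (PySem.Dict.modify d k 0 f).items = _ from pv_items_modify d k f hc hn, List.map_map]
  apply List.map_congr_left
  intro p _
  by_cases hpk : p.1 = k <;> simp [hpk]

-- the tn/fp update pair, as one map over the items
theorem pv_modify2_tnfp (d : PySem.Dict String Int) (z : Int)
    (htn : d.contains "tn" = true) (hfp : d.contains "fp" = true) (hn : d.keys.Nodup) :
    ((d.modify "tn" 0 (· + z)).modify "fp" 0 (· - z)).items = d.items.map (pvUpd z 0) := by
  have hfp1 : (d.modify "tn" 0 (· + z)).contains "fp" = true := by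
    rw [PySem.Dict.contains_modify]; simp [hfp]
  have hn1 : (d.modify "tn" 0 (· + z)).keys.Nodup := by
    rw [pv_keys_modify_of_contains d _ _ htn hn]; exact hn
  rw [pv_items_modify _ _ _ hfp1 hn1, pv_items_modify _ _ _ htn hn, List.map_map]
  apply List.map_congr_left
  intro p _
  by_cases p1 : p.1 = "tn" <;> by_cases p2 : p.1 = "fp" <;>
    by_cases p3 : p.1 = "tp" <;> by_cases p4 : p.1 = "fn" <;>
    simp_all [pvUpd, pvDelta, sub_eq_add_neg, Prod.ext_iff]

-- the tp/fn update pair, as one map over the items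
theorem pv_modify2_tpfn (d : PySem.Dict String Int) (o : Int)
    (htp : d.contains "tp" = true) (hfn : d.contains "fn" = true) (hn : d.keys.Nodup) :
    ((d.modify "tp" 0 (· - o)).modify "fn" 0 (· + o)).items = d.items.map (pvUpd 0 o) := by
  have hfn1 : (d.modify "tp" 0 (· - o)).contains "fn" = true := by
    rw [PySem.Dict.contains_modify]; simp [hfn]
  have hn1 : (d.modify "tp" 0 (· - o)).keys.Nodup := by
    rw [pv_keys_modify_of_contains d _ _ htp hn]; exact hn
  rw [pv_items_modify _ _ _ hfn1 hn1, pv_items_modify _ _ _ htp hn, List.map_map]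
  apply List.map_congr_left
  intro p _
  by_cases p1 : p.1 = "tn" <;> by_cases p2 : p.1 = "fp" <;>
    by_cases p3 : p.1 = "tp" <;> by_cases p4 : p.1 = "fn" <;>
    simp_all [pvUpd, pvDelta, sub_eq_add_neg, Prod.ext_iff]

theorem pv_nodup_modify2 (d : PySem.Dict String Int) (k1 k2 : String) (f1 f2 : Int → Int)
    (h1 : d.contains k1 = true) (h2 : d.contains k2 = true) (hn : d.keys.Nodup) :
    ((d.modify k1 0 f1).modify k2 0 f2).keys.Nodup := by
  have h2' : (d.modify k1 0 f1).contains k2 = true := by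
    rw [PySem.Dict.contains_modify]; simp [h2]
  have hn1 : (d.modify k1 0 f1).keys.Nodup := by
    rw [pv_keys_modify_of_contains d _ _ h1 hn]; exact hn
  rw [pv_keys_modify_of_contains _ _ _ h2' hn1]; exact hn1

theorem pv_contains_modify2 (d : PySem.Dict String Int) (k1 k2 k : String) (f1 f2 : Int → Int)
    (h : d.contains k = true) : ((d.modify k1 0 f1).modify k2 0 f2).contains k = true := by
  rw [PySem.Dict.contains_modify, PySem.Dict.contains_modify]; simp [h]

theorem pvZeros_nonneg (b : List Int) : 0 ≤ pvZeros b := by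
  induction b with
  | nil => simp [pvZeros]
  | cons x t ih =>
    simp only [pvZeros, List.map_cons, List.sum_cons] at *
    split_ifs <;> omega

theorem pvZeros_le_length (b : List Int) : pvZeros b ≤ (b.length : Int) := by
  induction b with
  | nil => simp [pvZeros]
  | cons x t ih =>
    simp only [pvZeros, List.map_cons, List.sum_cons, List.length_cons] at *
    split_ifs <;> push_cast <;> omega

theorem pvZeros_eq_zero_iff (b : List Int) : pvZeros b = 0 ↔ (0 : Int) ∉ b := by
  induction b with
  | nil => simp [pvZeros]
  | cons x t ih =>
    have h1 := pvZeros_nonneg t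
    simp only [pvZeros, List.map_cons, List.sum_cons, List.mem_cons] at h1 ih ⊢
    by_cases hx : x = 0
    · simp only [hx]
      constructor
      · intro h; exfalso; simp at h; omega
      · intro h; exfalso; simp at h
    · have hx' : ¬ (0 : Int) = x := fun h => hx h.symm
      simpa [if_neg hx, hx'] using ih

theorem pvZeros_eq_length_iff (b : List Int) : pvZeros b = (b.length : Int) ↔ ∀ x ∈ b, x = 0 := by
  induction b with
  | nil => simp [pvZeros]
  | cons x t ih =>
    have h1 := pvZeros_nonneg t
    have h2 := pvZeros_le_length t
    by_cases hx : x = 0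
    · have hc : pvZeros (x :: t) = 1 + pvZeros t := by simp [pvZeros, hx]
      have hl : ((x :: t).length : Int) = 1 + (t.length : Int) := by
        push_cast [List.length_cons]; ring
      constructor
      · intro h y hy
        rcases List.mem_cons.mp hy with h' | h'
        · exact h' ▸ hx
        · exact ih.mp (by omega) y h'
      · intro h
        have ht : pvZeros t = (t.length : Int) :=
          ih.mpr (fun y hy => h y (List.mem_cons_of_mem _ hy))
        omega
    · have hc : pvZeros (x :: t) = pvZeros t := by simp [pvZeros, hx]
      have hl : ((x :: t).length : Int) = 1 + (t.length : Int) := by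
        push_cast [List.length_cons]; ring
      constructor
      · intro h; exfalso; omega
      · intro h; exact absurd (h x List.mem_cons_self) hx

theorem pvOnes_eq_zero_iff (b : List Int) :
    (b.length : Int) - pvZeros b = 0 ↔ ¬ ∃ x ∈ b, x ≠ 0 := by
  have h := pvZeros_eq_length_iff b
  constructor
  · rintro hz ⟨x, hx, hne⟩
    exact hne (h.mp (by omega) x hx)
  · intro hne
    have hall : ∀ x ∈ b, x = 0 := fun x hx => by
      by_contra hc; exact hne ⟨x, hx, hc⟩
    have := h.mpr hall
    omega

theorem pv_foldA (block : List Int) :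
    ∀ (d : PySem.Dict String Int), d.keys.Nodup →
    ((0 : Int) ∈ block → d.contains "tn" = true ∧ d.contains "fp" = true) →
    ((∃ x ∈ block, x ≠ 0) → d.contains "tp" = true ∧ d.contains "fn" = true) →
    (block.foldl pvStepA d).items
      = d.items.map (pvUpd (pvZeros block) ((block.length : Int) - pvZeros block)) := by
  induction block with
  | nil =>
    intro d _ _ _
    have hz : pvZeros ([] : List Int) = 0 := rfl
    have hid : pvUpd 0 0 = fun p : String × Int => p := funext pvUpd_zero
    simp [hz, hid]
  | cons x t ih =>
    intro d hn h0 h1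
    by_cases hx : x = 0
    · subst hx
      obtain ⟨htn, hfp⟩ := h0 (List.mem_cons_self)
      have hn2 := pv_nodup_modify2 d "tn" "fp" (· + 1) (· - 1) htn hfp hn
      have hstep : List.foldl pvStepA d (0 :: t)
          = List.foldl pvStepA ((d.modify "tn" 0 (· + 1)).modify "fp" 0 (· - 1)) t := by
        simp [pvStepA]
      have hz : pvZeros (0 :: t) = 1 + pvZeros t := by simp [pvZeros]; try ring
      have hlen : ((0 :: t).length : Int) = 1 + (t.length : Int) := by
        push_cast [List.length_cons]; ring
      rw [hstep, ih _ hn2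
        (fun _ => ⟨pv_contains_modify2 d _ _ _ _ _ htn, pv_contains_modify2 d _ _ _ _ _ hfp⟩)
        (fun hm => by
          obtain ⟨htp, hfn⟩ := h1 (by
            obtain ⟨y, hy, hy0⟩ := hm
            exact ⟨y, List.mem_cons_of_mem _ hy, hy0⟩)
          exact ⟨pv_contains_modify2 d _ _ _ _ _ htp, pv_contains_modify2 d _ _ _ _ _ hfn⟩),
        pv_modify2_tnfp d 1 htn hfp hn, List.map_map]
      apply List.map_congr_left
      intro p _
      show pvUpd (pvZeros t) ((t.length : Int) - pvZeros t) (pvUpd 1 0 p) = _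
      rw [pvUpd_comp, hz, hlen] <;> (congr 1 <;> omega)
    · obtain ⟨htp, hfn⟩ := h1 ⟨x, List.mem_cons_self, hx⟩
      have hn2 := pv_nodup_modify2 d "tp" "fn" (· - 1) (· + 1) htp hfn hn
      have hstep : List.foldl pvStepA d (x :: t)
          = List.foldl pvStepA ((d.modify "tp" 0 (· - 1)).modify "fn" 0 (· + 1)) t := by
        simp [pvStepA, hx]
      have hz : pvZeros (x :: t) = pvZeros t := by simp [pvZeros, hx]
      have hlen : ((x :: t).length : Int) = 1 + (t.length : Int) := by
        push_cast [List.length_cons]; ring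
      rw [hstep, ih _ hn2
        (fun hm => by
          obtain ⟨htn, hfp⟩ := h0 (List.mem_cons_of_mem _ hm)
          exact ⟨pv_contains_modify2 d _ _ _ _ _ htn, pv_contains_modify2 d _ _ _ _ _ hfp⟩)
        (fun _ => ⟨pv_contains_modify2 d _ _ _ _ _ htp, pv_contains_modify2 d _ _ _ _ _ hfn⟩),
        pv_modify2_tpfn d 1 htp hfn hn, List.map_map]
      apply List.map_congr_left
      intro p _
      show pvUpd (pvZeros t) ((t.length : Int) - pvZeros t) (pvUpd 0 1 p) = _
      rw [pvUpd_comp, hz, hlen] <;> (congr 1 <;> omega)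

-- B's guarded pair of aggregate updates, as one map over the items
theorem pv_guarded (d : PySem.Dict String Int) (hn : d.keys.Nodup) (z o : Int)
    (h0 : z ≠ 0 → d.contains "tn" = true ∧ d.contains "fp" = true)
    (h1 : o ≠ 0 → d.contains "tp" = true ∧ d.contains "fn" = true) :
    (if o ≠ 0 then
       ((if z ≠ 0 then (d.modify "tn" 0 (· + z)).modify "fp" 0 (· - z) else d).modify "tp" 0 (· - o)).modify "fn" 0 (· + o)
     else (if z ≠ 0 then (d.modify "tn" 0 (· + z)).modify "fp" 0 (· - z) else d)).items
      = d.items.map (pvUpd z o) := by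
  by_cases hz : z = 0
  · rw [if_neg (not_not_intro hz)]
    by_cases ho : o = 0
    · rw [if_neg (not_not_intro ho)]
      subst hz; subst ho
      have hid : pvUpd 0 0 = fun p : String × Int => p := funext pvUpd_zero
      simp [hid]
    · obtain ⟨htp, hfn⟩ := h1 ho
      rw [if_pos ho, pv_modify2_tpfn d o htp hfn hn]
      subst hz; rfl
  · obtain ⟨htn, hfp⟩ := h0 hz
    rw [if_pos hz]
    by_cases ho : o = 0
    · rw [if_neg (not_not_intro ho), pv_modify2_tnfp d z htn hfp hn]
      subst ho; rfl
    · obtain ⟨htp, hfn⟩ := h1 ho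
      have hn2 := pv_nodup_modify2 d "tn" "fp" (· + z) (· - z) htn hfp hn
      rw [if_pos ho,
        pv_modify2_tpfn _ o (pv_contains_modify2 d _ _ _ _ _ htp)
          (pv_contains_modify2 d _ _ _ _ _ hfn) hn2,
        pv_modify2_tnfp d z htn hfp hn, List.map_map]
      apply List.map_congr_left
      intro p _
      show pvUpd 0 o (pvUpd z 0 p) = _
      rw [pvUpd_comp] <;> (congr 1 <;> omega)

theorem pv_altB (r : List (String × Int)) (mapped_labels : List Int) (i Int_ : Int)
    (h0 : (0 : Int) ∈ pvBlock mapped_labels i Int_ → "tn" ∈ r.map Prod.fst ∧ "fp" ∈ r.map Prod.fst)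
    (h1 : (∃ x ∈ pvBlock mapped_labels i Int_, x ≠ 0) → "tp" ∈ r.map Prod.fst ∧ "fn" ∈ r.map Prod.fst) :
    updateCM_forward_alt r mapped_labels i Int_
      = (PySem.Dict.ofList r).items.map
          (pvUpd (pvZeros (pvBlock mapped_labels i Int_))
            (((pvBlock mapped_labels i Int_).length : Int) - pvZeros (pvBlock mapped_labels i Int_))) := by
  have e : updateCM_forward_alt r mapped_labels i Int_
      = (if (((pvBlock mapped_labels i Int_).length : Int) - pvZeros (pvBlock mapped_labels i Int_)) ≠ 0 then
           ((if pvZeros (pvBlock mapped_labels i Int_) ≠ 0 then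
               ((PySem.Dict.ofList r).modify "tn" 0 (· + pvZeros (pvBlock mapped_labels i Int_))).modify "fp" 0
                 (· - pvZeros (pvBlock mapped_labels i Int_))
             else PySem.Dict.ofList r).modify "tp" 0
              (· - (((pvBlock mapped_labels i Int_).length : Int) - pvZeros (pvBlock mapped_labels i Int_)))).modify "fn" 0
              (· + (((pvBlock mapped_labels i Int_).length : Int) - pvZeros (pvBlock mapped_labels i Int_)))
         else (if pvZeros (pvBlock mapped_labels i Int_) ≠ 0 then
               ((PySem.Dict.ofList r).modify "tn" 0 (· + pvZeros (pvBlock mapped_labels i Int_))).modify "fp" 0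
                 (· - pvZeros (pvBlock mapped_labels i Int_))
             else PySem.Dict.ofList r)).items := rfl
  rw [e]
  exact pv_guarded (PySem.Dict.ofList r) (PySem.Dict.nodup_keys_ofList r) _ _
    (fun hz => by
      have hm : (0 : Int) ∈ pvBlock mapped_labels i Int_ := by
        by_contra hc; exact hz ((pvZeros_eq_zero_iff _).mpr hc)
      exact ⟨(pv_contains_ofList r "tn").mpr (h0 hm).1, (pv_contains_ofList r "fp").mpr (h0 hm).2⟩)
    (fun ho => by
      have hm : ∃ x ∈ pvBlock mapped_labels i Int_, x ≠ 0 := by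
        by_contra hc; exact ho ((pvOnes_eq_zero_iff _).mpr hc)
      exact ⟨(pv_contains_ofList r "tp").mpr (h1 hm).1, (pv_contains_ofList r "fn").mpr (h1 hm).2⟩)

theorem pv_range_map_slice (ml : List Int) (lo hi : Int) (hlo : 0 ≤ lo) (hhi0 : 0 ≤ hi)
    (hhil : hi ≤ (ml.length : Int)) :
    (PySem.List.pyRange lo hi 1).map (fun j => PySem.List.pyGetD ml j 0)
      = PySem.List.slice ml (some lo) (some hi) := by
  by_cases hle : hi ≤ lo
  · rw [PySem.List.pyRange_one_eq_nil hle, PySem.List.slice_toNat ml hlo hhi0,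
      show hi.toNat - lo.toNat = 0 by omega]
    simp
  · have hlt : lo < hi := by omega
    have hsplit := PySem.List.pyRange_one_append lo hi (ml.length : Int) (le_of_lt hlt) hhil
    have hdrop := PySem.List.map_pyGetD_pyRange' ml 0 hlo
    rw [hsplit, List.map_append] at hdrop
    have htake := congrArg
      (List.take ((PySem.List.pyRange lo hi 1).map (fun j => PySem.List.pyGetD ml j 0)).length)
      hdrop.symm
    rw [List.take_left] at htake
    rw [← htake, PySem.List.slice_toNat ml hlo hhi0]
    congr 1
    simp [PySem.List.length_pyRange_one]
    omega

theorem pvBlock_eq_nil (mapped_labels : List Int) (i Int_ : Int)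
    (h : min (i * Int_) (mapped_labels.length : Int) ≤ (i - 1) * Int_) :
    pvBlock mapped_labels i Int_ = [] := by
  apply List.eq_nil_of_length_eq_zero
  rw [pvBlock, PySem.List.length_slice]
  have h1 : PySem.List.clampIdx mapped_labels.length (max (min (i * Int_) (mapped_labels.length : Int)) 0)
      ≤ PySem.List.clampIdx mapped_labels.length ((i - 1) * Int_) := by
    simp only [PySem.List.clampIdx]
    split_ifs <;> omega
  omega

theorem pv_A_eq (r : List (String × Int)) (mapped_labels : List Int) (i Int_ : Int)
    (hpre : Pre_updateCM_forward r mapped_labels i Int_) :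
    updateCM_forward r mapped_labels i Int_
      = (PySem.Dict.ofList r).items.map
          (pvUpd (pvZeros (pvBlock mapped_labels i Int_))
            (((pvBlock mapped_labels i Int_).length : Int) - pvZeros (pvBlock mapped_labels i Int_))) := by
  obtain ⟨hstart0, h0, h1⟩ := hpre
  by_cases hstart : 0 ≤ (i - 1) * Int_
  case neg =>
    have hemp : min (i * Int_) (mapped_labels.length : Int) ≤ (i - 1) * Int_ :=
      hstart0.resolve_left hstart
    show ((PySem.List.pyRange ((i - 1) * Int_) (min (i * Int_) (mapped_labels.length : Int)) 1).foldl
        (fun cm j =>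
          if PySem.List.pyGetD mapped_labels j 0 = 0 then
            (cm.modify "tn" 0 (· + 1)).modify "fp" 0 (· - 1)
          else
            (cm.modify "tp" 0 (· - 1)).modify "fn" 0 (· + 1)) (PySem.Dict.ofList r)).items = _
    rw [PySem.List.pyRange_one_eq_nil hemp, pvBlock_eq_nil mapped_labels i Int_ hemp]
    have hz : pvZeros ([] : List Int) = 0 := rfl
    have hid : pvUpd 0 0 = fun p : String × Int => p := funext pvUpd_zero
    simp [hz, hid]
  have hrange : PySem.List.pyRange ((i - 1) * Int_) (min (i * Int_) (mapped_labels.length : Int)) 1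
      = PySem.List.pyRange ((i - 1) * Int_) (max (min (i * Int_) (mapped_labels.length : Int)) 0) 1 := by
    by_cases h : 0 ≤ min (i * Int_) (mapped_labels.length : Int)
    · rw [max_eq_left h]
    · rw [max_eq_right (by omega : min (i * Int_) (mapped_labels.length : Int) ≤ 0),
        PySem.List.pyRange_one_eq_nil (by omega),
        PySem.List.pyRange_one_eq_nil hstart]
  have hblock : (PySem.List.pyRange ((i - 1) * Int_) (max (min (i * Int_) (mapped_labels.length : Int)) 0) 1).map
        (fun j => PySem.List.pyGetD mapped_labels j 0) = pvBlock mapped_labels i Int_ :=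
    pv_range_map_slice mapped_labels _ _ hstart (le_max_right _ _)
      (max_le (min_le_right _ _) (Int.natCast_nonneg _))
  have hfold : (PySem.List.pyRange ((i - 1) * Int_) (min (i * Int_) (mapped_labels.length : Int)) 1).foldl
      (fun cm j =>
        if PySem.List.pyGetD mapped_labels j 0 = 0 then
          (cm.modify "tn" 0 (· + 1)).modify "fp" 0 (· - 1)
        else
          (cm.modify "tp" 0 (· - 1)).modify "fn" 0 (· + 1)) (PySem.Dict.ofList r)
      = (pvBlock mapped_labels i Int_).foldl pvStepA (PySem.Dict.ofList r) := by
    rw [hrange, ← hblock, List.foldl_map]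
    rfl
  show ((PySem.List.pyRange ((i - 1) * Int_) (min (i * Int_) (mapped_labels.length : Int)) 1).foldl
      (fun cm j =>
        if PySem.List.pyGetD mapped_labels j 0 = 0 then
          (cm.modify "tn" 0 (· + 1)).modify "fp" 0 (· - 1)
        else
          (cm.modify "tp" 0 (· - 1)).modify "fn" 0 (· + 1)) (PySem.Dict.ofList r)).items = _
  rw [hfold]
  exact pv_foldA (pvBlock mapped_labels i Int_) (PySem.Dict.ofList r)
    (PySem.Dict.nodup_keys_ofList r)
    (fun hm => ⟨(pv_contains_ofList r "tn").mpr (h0 hm).1, (pv_contains_ofList r "fp").mpr (h0 hm).2⟩)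
    (fun hm => ⟨(pv_contains_ofList r "tp").mpr (h1 hm).1, (pv_contains_ofList r "fn").mpr (h1 hm).2⟩)

-- ===== VERDICT (by name: the statement is the Claim_ definition above) =====
theorem updateCM_forward_spec : Claim_equal_updateCM_forward := by
  intro r mapped_labels i Int_ _ hpre
  unfold Spec_updateCM_forward
  rw [pv_A_eq r mapped_labels i Int_ hpre,
    pv_altB r mapped_labels i Int_ hpre.2.1 hpre.2.2]
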